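-- pv_equiv track=rewrite | github.com/route250/MiyaSaburo | MiyaSaburo/AI_personality.py | split_status
-- ===== SOURCE A (Python) =====
-- def split_status( content:str, inp: dict ):
--     out = {}
--     s=0
--     key = None
--     for token in inp.keys():
--         e = content.find(token,s)
--         if s>=e:
--             return None
--         ee = e
--         while 0<ee and content[ee-1] != '\n':
--             ee -= 1
--         value = content[s:ee].strip()
--         if key is not None:
--             out[key] = value
--         key = token
--         s = e + len(token)
--     if key is not None:
--         out[key] = content[s:]
--     return out
-- ===== SOURCE B (Python) =====
-- def split_status(content: str, inp: dict):
--     # pass 1: locate every token, recording (token, start_search_pos, match_pos)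
--     recs = []
--     s = 0
--     for token in inp.keys():
--         e = content.find(token, s)
--         if s >= e:
--             return None
--         recs.append((token, s, e))
--         s = e + len(token)
--     # pass 2: each token's value runs from the position after it up to the
--     # start of the line on which the next token was found
--     out = {}
--     for (tok, _, _), (_, ps, pe) in zip(recs, recs[1:]):
--         out[tok] = content[ps:content.rfind('\n', 0, pe) + 1].strip()
--     if recs:
--         out[recs[-1][0]] = content[s:]
--     return out
-- ===== Notes on version B (the rewrite author's own statement) =====
-- stated objective: alternative
-- what changed: A interleaves find, a backward character-by-character while-loop to the line start, and delayed assignment to the previous key in one stateful loop; B splits the work into two passes: first record every token's (start, match) position, then build the dict from consecutive record pairs, locating the line start with rfind('\n', 0, e) + 1 instead of the backward loop.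
import Mathlib
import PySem

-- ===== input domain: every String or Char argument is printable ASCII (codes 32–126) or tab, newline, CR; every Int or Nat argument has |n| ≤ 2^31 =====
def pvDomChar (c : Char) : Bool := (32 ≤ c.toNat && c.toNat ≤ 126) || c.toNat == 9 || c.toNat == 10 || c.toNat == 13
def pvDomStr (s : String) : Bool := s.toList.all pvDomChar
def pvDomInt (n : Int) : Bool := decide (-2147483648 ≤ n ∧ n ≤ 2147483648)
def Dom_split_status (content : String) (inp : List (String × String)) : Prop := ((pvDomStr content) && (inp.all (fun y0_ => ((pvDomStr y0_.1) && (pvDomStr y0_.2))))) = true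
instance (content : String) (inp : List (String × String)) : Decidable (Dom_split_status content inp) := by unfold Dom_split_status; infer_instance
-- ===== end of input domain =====

-- B replaces A's accumulator loop (backward while-loop to the line start, value held for the
-- previous key) by two passes: record all token positions, then build the dict from consecutive
-- pairs using rfind('\n', 0, e) + 1 for the line start; objective: simpler decomposition.
-- Both Pythons' dict writes only ever hit fresh keys (keys() is duplicate-free and each key is
-- assigned once), so dict assignment is ported as list append.

-- ===== PORT A =====
-- the backward 'while 0<ee and content[ee-1] != "\n"' loop, as recursion on ee
def pvBackA (cs : List Char) : Nat → Nat
  | 0 => 0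
  | n+1 => if cs[n]? ≠ some '\n' then pvBackA cs n else n+1

-- the 'for token in inp.keys()' loop with its s/key/out state
def pvLoopA (cs : List Char) : List String → Nat → Option String → List (String × String) →
    Option (List (String × String))
  | [], s, key?, out =>
      some (match key? with
        | none => out
        | some k => out ++ [(k, String.ofList (PySem.Chars.slice cs (some (s:Int)) none))])
  | tok :: rest, s, key?, out =>
      let e := PySem.Chars.findFrom cs tok.toList (s:Int) none
      if (s:Int) ≥ e then none
      else
        let ee := pvBackA cs e.toNat
        let value := String.ofList (PySem.Chars.strip (PySem.Chars.slice cs (some (s:Int)) (some (ee:Int))))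
        let out' := match key? with | none => out | some k => out ++ [(k, value)]
        pvLoopA cs rest (e.toNat + tok.toList.length) (some tok) out'

def split_status (content : String) (inp : List (String × String)) :
    Option (List (String × String)) :=
  pvLoopA content.toList (PySem.List.dedup (inp.map Prod.fst)) 0 none []

-- ===== PORT B =====
-- pass 1: record (token, start-of-search, match-position) for every token; final s returned too
def pvScanB (cs : List Char) : List String → Nat → Option (List (String × Nat × Nat) × Nat)
  | [], s => some ([], s)
  | tok :: rest, s =>
      let e := PySem.Chars.findFrom cs tok.toList (s:Int) none
      if (s:Int) ≥ e then none
      else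
        (pvScanB cs rest (e.toNat + tok.toList.length)).map
          (fun p => ((tok, s, e.toNat) :: p.1, p.2))

-- content[ps : content.rfind('\n', 0, pe) + 1].strip()
def pvValB (cs : List Char) (ps pe : Nat) : String :=
  String.ofList (PySem.Chars.strip (PySem.Chars.slice cs (some (ps:Int))
    (some (PySem.Chars.rfindFrom cs ['\n'] 0 (some (pe:Int)) + 1))))

def split_status_alt (content : String) (inp : List (String × String)) :
    Option (List (String × String)) :=
  (pvScanB content.toList (PySem.List.dedup (inp.map Prod.fst)) 0).map (fun p =>
    (p.1.zip p.1.tail).map (fun q => (q.1.1, pvValB content.toList q.2.2.1 q.2.2.2)) ++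
      (match p.1.getLast? with
       | none => []
       | some l => [(l.1, String.ofList (PySem.Chars.slice content.toList (some (p.2:Int)) none))]))

-- ===== PRECONDITION & SPEC =====
def Spec_split_status (content : String) (inp : List (String × String)) (out : Option (List (String × String))) : Prop := out = split_status_alt content inp
instance (content : String) (inp : List (String × String)) (out : Option (List (String × String))) : Decidable (Spec_split_status content inp out) := by unfold Spec_split_status; infer_instance

-- ===== CLAIM (what is proved, stated in full; the proofs are below) =====
def Claim_equal_split_status : Prop := ∀ (content : String) (inp : List (String × String)), Dom_split_status content inp → Spec_split_status content inp (split_status content inp)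

-- ===== LEMMAS AND PROOFS =====

-- A's value for one emitted key, in A's form
def pvValA (cs : List Char) (ps pe : Nat) : String :=
  String.ofList (PySem.Chars.strip (PySem.Chars.slice cs (some (ps:Int)) (some ((pvBackA cs pe):Int))))

-- what A's remaining loop appends, expressed over B's records
def pvAsm (cs : List Char) : Option String → List (String × Nat × Nat) → Nat → List (String × String)
  | none, [], _ => []
  | some k, [], fin => [(k, String.ofList (PySem.Chars.slice cs (some (fin:Int)) none))]
  | key?, (t, ps, pe) :: r, fin =>
      (match key? with | none => [] | some k => [(k, pvValA cs ps pe)]) ++ pvAsm cs (some t) r fin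

theorem pvGo_ge (t sub : List Char) (j : Nat) : -1 ≤ PySem.Chars.rfind.go t sub j := by
  induction j with
  | zero => unfold PySem.Chars.rfind.go; split <;> omega
  | succ n ih => unfold PySem.Chars.rfind.go; split <;> simp_all <;> omega

theorem pvGo_succ (t sub : List Char) (j : Nat) :
    PySem.Chars.rfind.go t sub (j+1) =
      if sub.isPrefixOf (t.drop (j+1)) = true then ((j:Int)+1) else PySem.Chars.rfind.go t sub j := by
  rfl

theorem pvSingleton_prefix (c : Char) (xs : List Char) :
    (List.isPrefixOf [c] xs = true) ↔ xs.head? = some c := by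
  cases xs with
  | nil => simp
  | cons hd tl =>
      show (c == hd && List.isPrefixOf [] tl) = true ↔ _
      simp only [List.isPrefixOf, Bool.and_true, beq_iff_eq, List.head?_cons, Option.some.injEq]
      exact eq_comm

theorem pvGo_cond (t : List Char) (j : Nat) :
    (List.isPrefixOf ['\n'] (t.drop j) = true) ↔ t[j]? = some '\n' := by
  rw [pvSingleton_prefix, List.head?_drop]

theorem pvGo_cond0 (t : List Char) :
    (List.isPrefixOf ['\n'] t = true) ↔ t[0]? = some '\n' := by
  simpa using pvGo_cond t 0

theorem pvGo_agree (t t' : List Char) (j : Nat)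
    (h : ∀ i ≤ j, t[i]? = t'[i]?) :
    PySem.Chars.rfind.go t ['\n'] j = PySem.Chars.rfind.go t' ['\n'] j := by
  induction j with
  | zero =>
      unfold PySem.Chars.rfind.go
      simp only [pvGo_cond0, h 0 (le_refl 0)]
  | succ n ih =>
      rw [pvGo_succ, pvGo_succ]
      simp only [pvGo_cond, h (n+1) (le_refl _)]
      split_ifs
      · rfl
      · exact ih (fun i hi => h i (Nat.le_succ_of_le hi))

theorem pvRfind_ge (t sub : List Char) : -1 ≤ PySem.Chars.rfind t sub := by
  unfold PySem.Chars.rfind; exact pvGo_ge t sub t.length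

theorem pvRfind_take_go (cs : List Char) (m : Nat) (hm : m ≤ cs.length) :
    PySem.Chars.rfind (cs.take m) ['\n'] = PySem.Chars.rfind.go (cs.take m) ['\n'] m := by
  unfold PySem.Chars.rfind
  rw [List.length_take, min_eq_left hm]

theorem pvBackA_eq_rfind (cs : List Char) (m : Nat) (hm : m ≤ cs.length) :
    pvBackA cs m = (PySem.Chars.rfind (cs.take m) ['\n'] + 1).toNat := by
  induction m with
  | zero =>
      rw [pvRfind_take_go cs 0 (Nat.zero_le _)]
      unfold pvBackA PySem.Chars.rfind.go
      rw [if_neg (by simp)]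
      rfl
  | succ m ih =>
      rw [pvRfind_take_go cs (m+1) hm, pvGo_succ]
      rw [if_neg (by
        rw [pvGo_cond]
        rw [List.getElem?_eq_none (by rw [List.length_take]; omega)]
        simp)]
      cases m with
      | zero =>
          unfold pvBackA PySem.Chars.rfind.go
          have h0 : (cs.take 1)[0]? = cs[0]? := List.getElem?_take_of_lt (by omega)
          by_cases hc : cs[0]? = some '\n'
          · rw [if_pos ((pvGo_cond0 _).2 (h0.trans hc)), if_neg (by simp [hc])]
            rfl
          · rw [if_neg (fun hp => hc (h0 ▸ (pvGo_cond0 _).1 hp)), if_pos (by simp [hc])]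
            rfl
      | succ k =>
          rw [pvGo_succ]
          have htk : (cs.take (k+2))[k+1]? = cs[k+1]? := List.getElem?_take_of_lt (by omega)
          by_cases hc : cs[k+1]? = some '\n'
          · rw [if_pos ((pvGo_cond _ _).2 (htk.trans hc))]
            unfold pvBackA
            rw [if_neg (by simp [hc])]
            omega
          · rw [if_neg (fun hp => hc (htk ▸ (pvGo_cond _ _).1 hp))]
            unfold pvBackA
            rw [if_pos (by simp [hc])]
            have hagree : PySem.Chars.rfind.go (cs.take (k+2)) ['\n'] k =
                PySem.Chars.rfind.go (cs.take (k+1)) ['\n'] k := by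
              apply pvGo_agree
              intro i hi
              rw [List.getElem?_take_of_lt (by omega), List.getElem?_take_of_lt (by omega)]
            have hrhs : PySem.Chars.rfind.go (cs.take (k+1)) ['\n'] (k+1) =
                PySem.Chars.rfind.go (cs.take (k+1)) ['\n'] k := by
              rw [pvGo_succ]
              rw [if_neg (by
                rw [pvGo_cond]
                rw [List.getElem?_eq_none (by rw [List.length_take]; omega)]
                simp)]
            rw [hagree, ih (by omega), pvRfind_take_go cs (k+1) (by omega), hrhs]

theorem pvRfindFrom_take (cs : List Char) (pe : Nat) (h : pe ≤ cs.length) :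
    PySem.Chars.rfindFrom cs ['\n'] 0 (some (pe:Int)) = PySem.Chars.rfind (cs.take pe) ['\n'] := by
  have h1 : ¬((cs.length:Int) < (pe:Int)) := by exact_mod_cast not_lt.2 h
  have h2 : ¬((pe:Int) < 0) := by omega
  norm_num [PySem.Chars.rfindFrom, h1, h2]
  intro hr
  omega

theorem pvValA_eq_valB (cs : List Char) (ps pe : Nat) (h : pe ≤ cs.length) :
    pvValA cs ps pe = pvValB cs ps pe := by
  have hge := pvRfind_ge (cs.take pe) ['\n']
  have hcast : ((pvBackA cs pe : Nat) : Int) = PySem.Chars.rfind (cs.take pe) ['\n'] + 1 := by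
    rw [pvBackA_eq_rfind cs pe h]; omega
  unfold pvValA pvValB
  rw [hcast, pvRfindFrom_take cs pe h]

theorem pvFind_step (cs tok : List Char) (s : Nat) (hs : s ≤ cs.length)
    (h : (s:Int) < PySem.Chars.findFrom cs tok (s:Int) none) :
    (PySem.Chars.findFrom cs tok (s:Int) none).toNat + tok.length ≤ cs.length := by
  have hne : PySem.Chars.findFrom cs tok (s:Int) none ≠ -1 := by omega
  obtain ⟨hse, hpre, -⟩ := PySem.Chars.findFrom_natCast_spec cs tok s hs hne
  by_cases htok : tok = []
  · subst htok
    rw [PySem.Chars.findFrom_natCast cs [] s hs] at h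
    simp [PySem.Chars.find_nil] at h
  · have hlen := hpre.length_le
    rw [List.length_drop] at hlen
    have hnn : cs.drop (PySem.Chars.findFrom cs tok (s:Int) none).toNat ≠ [] := by
      intro hnil
      exact htok (List.prefix_nil.mp (hnil ▸ hpre))
    have hlt : (PySem.Chars.findFrom cs tok (s:Int) none).toNat < cs.length := by
      by_contra hge
      exact hnn (List.drop_eq_nil_iff.mpr (by omega))
    omega

theorem pvMain (cs : List Char) (toks : List String) (s : Nat) (key? : Option String)
    (out : List (String × String)) (hs : s ≤ cs.length) :
    pvLoopA cs toks s key? out =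
      (pvScanB cs toks s).map (fun p => out ++ pvAsm cs key? p.1 p.2) := by
  induction toks generalizing s key? out with
  | nil => cases key? <;> simp [pvLoopA, pvScanB, pvAsm]
  | cons tok rest ih =>
      by_cases hcond : (s:Int) ≥ PySem.Chars.findFrom cs tok.toList (s:Int) none
      · simp only [pvLoopA, pvScanB, if_pos hcond, Option.map_none]
      · have hlt := lt_of_not_ge hcond
        have hstep := pvFind_step cs tok.toList s hs hlt
        simp only [pvLoopA, pvScanB, if_neg hcond]
        rw [ih _ (some tok) _ (by omega)]
        cases pvScanB cs rest ((PySem.Chars.findFrom cs tok.toList (s:Int) none).toNat + tok.toList.length) with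
        | none => rfl
        | some p =>
            cases key? with
            | none => simp [pvAsm]
            | some k => simp [pvAsm, pvValA]

theorem pvScanB_pe (cs : List Char) (toks : List String) (s : Nat) (recs : List (String × Nat × Nat))
    (fin : Nat) (hs : s ≤ cs.length) (h : pvScanB cs toks s = some (recs, fin)) :
    ∀ q ∈ recs, q.2.2 ≤ cs.length := by
  induction toks generalizing s recs fin with
  | nil =>
      unfold pvScanB at h
      cases h
      intro q hq
      simp at hq
  | cons tok rest ih =>
      by_cases hcond : (s:Int) ≥ PySem.Chars.findFrom cs tok.toList (s:Int) none
      · unfold pvScanB at h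
        rw [if_pos hcond] at h
        cases h
      · have hlt := lt_of_not_ge hcond
        have hstep := pvFind_step cs tok.toList s hs hlt
        simp only [pvScanB, if_neg hcond] at h
        cases hrec : pvScanB cs rest ((PySem.Chars.findFrom cs tok.toList (s:Int) none).toNat + tok.toList.length) with
        | none => rw [hrec] at h; cases h
        | some p =>
            rw [hrec] at h
            simp only [Option.map_some, Option.some.injEq, Prod.mk.injEq] at h
            obtain ⟨h1, -⟩ := h
            subst h1
            intro q hq
            rcases List.mem_cons.mp hq with rfl | hq'
            · exact le_trans (Nat.le_add_right _ _) hstep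
            · exact ih _ _ _ (by omega) hrec q hq'

theorem pvAsmZip (cs : List Char) (recs : List (String × Nat × Nat)) (fin : Nat) (t : String)
    (hb : ∀ q ∈ recs, q.2.2 ≤ cs.length) :
    pvAsm cs (some t) recs fin =
      (((t, 0, 0) :: recs).zip recs).map (fun q => (q.1.1, pvValB cs q.2.2.1 q.2.2.2)) ++
        [(recs.getLast?.elim t (·.1), String.ofList (PySem.Chars.slice cs (some (fin:Int)) none))] := by
  induction recs generalizing t with
  | nil => simp [pvAsm]
  | cons a r ih =>
      obtain ⟨at', aps, ape⟩ := a
      rw [show pvAsm cs (some t) ((at', aps, ape) :: r) fin =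
        [(t, pvValA cs aps ape)] ++ pvAsm cs (some at') r fin from rfl]
      rw [pvValA_eq_valB cs aps ape (hb _ (List.mem_cons_self))]
      rw [ih at' (fun q hq => hb q (List.mem_cons_of_mem _ hq))]
      cases r with
      | nil => simp
      | cons b r' =>
          cases hgl : (b :: r').getLast? with
          | none => exact absurd hgl (by simp)
          | some l => simp [List.zip_cons_cons, List.getLast?_cons_cons, hgl]

-- ===== VERDICT (by name: the statement is the Claim_ definition above) =====
theorem split_status_spec : Claim_equal_split_status := by
  intro content inp _
  unfold Spec_split_status split_status split_status_alt
  rw [pvMain content.toList _ 0 none [] (Nat.zero_le _)]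
  cases hscan : pvScanB content.toList (PySem.List.dedup (inp.map Prod.fst)) 0 with
  | none => rfl
  | some p =>
      obtain ⟨recs, fin⟩ := p
      simp only [Option.map_some, Option.some.injEq, List.nil_append]
      have hb := pvScanB_pe content.toList _ 0 recs fin (Nat.zero_le _) hscan
      cases recs with
      | nil => rfl
      | cons a r =>
          obtain ⟨at', aps, ape⟩ := a
          rw [show pvAsm content.toList none ((at', aps, ape) :: r) fin =
            pvAsm content.toList (some at') r fin from by simp [pvAsm]]
          rw [pvAsmZip content.toList r fin at' (fun q hq => hb q (List.mem_cons_of_mem _ hq))]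
          cases r with
          | nil => simp
          | cons b r' =>
              rw [List.tail_cons]
              cases hgl : (b :: r').getLast? with
              | none => exact absurd hgl (by simp)
              | some l => simp [List.zip_cons_cons, List.getLast?_cons_cons, hgl]
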